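-- pv_equiv track=rewrite | github.com/OlaszPL/Introduction_to_computer_science_course | Zestaw3/zad15.py | zad15
-- ===== SOURCE A (Python) =====
-- from math import isqrt
--
-- def is_prime(a):
--     if a <= 1:
--         return False
--     if a == 2 or a == 3:
--         return True
--     if a % 2 == 0 or a % 3 == 0:
--         return False
--
--     i = 5
--
--     while i <= isqrt(a):
--         if a % i == 0:
--             return False
--         i += 2
--         if a % i == 0:
--             return False
--         i += 4
--
--     return True
--
-- def is_composite(a):
--     if a != 0 and a != 1 and not is_prime(a):
--         return True
--     else:
--         return False
--
-- def zad15(t):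
--     n = len(t)
--     is_element_of_fib = [False] * n
--     a, b = 1, 1 # bo ciag od 1
--     while a < n:
--         is_element_of_fib[a] = True # tablica czy indeks jest liczba z ciagu Fibbonacciego
--         a, b = b, a + b
--
--     flag = False
--     for i in range(n):
--         if is_element_of_fib[i] and not is_composite(t[i]):
--             return False
--         elif is_prime(t[i]):
--             flag = True
--
--     return flag
-- ===== SOURCE B (Python) =====
-- from math import isqrt
--
-- def is_prime(a):
--     if a <= 1:
--         return False
--     if a == 2 or a == 3:
--         return True
--     if a % 2 == 0 or a % 3 == 0:
--         return False
--     i = 5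
--     while i <= isqrt(a):
--         if a % i == 0:
--             return False
--         i += 2
--         if a % i == 0:
--             return False
--         i += 4
--     return True
--
-- def is_composite(a):
--     return a != 0 and a != 1 and not is_prime(a)
--
-- def zad15(t):
--     n = len(t)
--     fibs = []
--     a, b = 1, 1
--     while a < n:
--         fibs.append(a)
--         a, b = b, a + b
--     if any(not is_composite(t[i]) for i in fibs):
--         return False
--     return any(is_prime(x) for x in t)
-- ===== Notes on version B (the rewrite author's own statement) =====
-- stated objective: alternative
-- what changed: Replaces A's boolean index array plus single interleaved loop with early return by building the list of Fibonacci indices once and running two separate passes: a non-composite scan over just the Fibonacci indices, then any(is_prime) over the whole array.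
import Mathlib
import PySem

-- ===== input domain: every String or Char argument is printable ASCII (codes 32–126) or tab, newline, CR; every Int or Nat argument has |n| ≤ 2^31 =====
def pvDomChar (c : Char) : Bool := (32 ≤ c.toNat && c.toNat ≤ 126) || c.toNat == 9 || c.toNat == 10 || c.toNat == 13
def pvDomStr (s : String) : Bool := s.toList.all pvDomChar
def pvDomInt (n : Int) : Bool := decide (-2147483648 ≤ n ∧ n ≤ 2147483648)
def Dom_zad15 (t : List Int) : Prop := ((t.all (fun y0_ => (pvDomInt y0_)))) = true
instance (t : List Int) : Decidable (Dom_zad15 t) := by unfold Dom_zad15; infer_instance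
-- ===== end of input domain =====

-- B replaces the boolean index array + one interleaved early-return loop by a Fibonacci index
-- list and two separate passes (alternative decomposition; not claimed faster).

-- ===== PORT A =====
-- shared helpers of both Pythons: is_prime / is_composite, transliterated.
-- while i <= isqrt(a): … i += 2 … i += 4   (i stays ≥ 5 and a > 0 at every call site, so Nat i and
-- a.toNat.sqrt are exact; the fuel a.toNat.sqrt + 1 only bounds the loop, which advances i by 6 each
-- pass, so it never runs out before the while-condition fails)
def isPrimeLoop (a : Int) (i fuel : Nat) : Bool :=
  match fuel with
  | 0 => true
  | fuel + 1 =>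
    if i ≤ a.toNat.sqrt then
      if PySem.Int.mod a (i : Int) == 0 then false
      else if PySem.Int.mod a ((i : Int) + 2) == 0 then false
      else isPrimeLoop a (i + 6) fuel
    else true

def is_prime (a : Int) : Bool :=
  if a ≤ 1 then false
  else if a == 2 || a == 3 then true
  else if PySem.Int.mod a 2 == 0 || PySem.Int.mod a 3 == 0 then false
  else isPrimeLoop a 5 (a.toNat.sqrt + 1)

def is_composite (a : Int) : Bool :=
  if a != 0 && a != 1 && !is_prime a then true else false

-- while a < n: is_element_of_fib[a] = True; a, b = b, a + b   (a is a Fibonacci number ≥ its index-count,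
-- so the loop runs at most n + 2 times: the fuel n + 2 never runs out before a ≥ n)
def fibMark (n : Nat) (arr : List Bool) (a b fuel : Nat) : List Bool :=
  match fuel with
  | 0 => arr
  | fuel + 1 => if a < n then fibMark n (arr.set a true) b (a + b) fuel else arr

-- for i in range(n): if fib[i] and not is_composite(t[i]): return False; elif is_prime(t[i]): flag = True
def zadLoop (t : List Int) (fib : List Bool) (idxs : List Nat) (flag : Bool) : Bool :=
  match idxs with
  | [] => flag
  | i :: rest =>
    if fib.getD i false && !is_composite (t.getD i 0) then false
    else if is_prime (t.getD i 0) then zadLoop t fib rest true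
    else zadLoop t fib rest flag

def zad15 (t : List Int) : Bool :=
  zadLoop t (fibMark t.length (List.replicate t.length false) 1 1 (t.length + 2))
    (List.range t.length) false

-- ===== PORT B =====
-- while a < n: fibs.append(a); a, b = b, a + b   (same loop bound as fibMark: fuel n + 2 is never exhausted)
def fibList (n a b fuel : Nat) : List Nat :=
  match fuel with
  | 0 => []
  | fuel + 1 => if a < n then a :: fibList n b (a + b) fuel else []

def zad15_alt (t : List Int) : Bool :=
  if (fibList t.length 1 1 (t.length + 2)).any (fun i => !is_composite (t.getD i 0)) then false
  else t.any (fun x => is_prime x)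

-- ===== PRECONDITION & SPEC =====
def Spec_zad15 (t : List Int) (out : Bool) : Prop := out = zad15_alt t
instance (t : List Int) (out : Bool) : Decidable (Spec_zad15 t out) := by unfold Spec_zad15; infer_instance

-- ===== CLAIM (what is proved, stated in full; the proofs are below) =====
def Claim_equal_zad15 : Prop := ∀ (t : List Int), Dom_zad15 t → Spec_zad15 t (zad15 t)

-- ===== LEMMAS AND PROOFS =====

-- every element of fibList n a b fuel is < n
theorem fibList_lt (n : Nat) : ∀ (fuel a b : Nat), ∀ x ∈ fibList n a b fuel, x < n := by
  intro fuel
  induction fuel with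
  | zero => intro a b x hx; simp [fibList] at hx
  | succ f ih =>
    intro a b x hx
    simp only [fibList] at hx
    by_cases h : a < n
    · rw [if_pos h, List.mem_cons] at hx
      rcases hx with rfl | hx
      · exact h
      · exact ih b (a + b) x hx
    · rw [if_neg h] at hx; cases hx

-- the marked array agrees with membership in fibList
theorem fibMark_getD (n : Nat) : ∀ (fuel : Nat) (arr : List Bool) (a b k : Nat),
    arr.length = n →
    (fibMark n arr a b fuel).getD k false
      = (arr.getD k false || decide (k ∈ fibList n a b fuel)) := by
  intro fuel
  induction fuel with
  | zero => intro arr a b k hlen; simp [fibMark, fibList]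
  | succ f ih =>
    intro arr a b k hlen
    simp only [fibMark, fibList]
    by_cases h : a < n
    · simp only [if_pos h]
      rw [ih (arr.set a true) b (a + b) k (by simpa using hlen)]
      by_cases hk : k = a
      · subst hk
        have hset : (arr.set k true).getD k false = true := by
          rw [List.getD_eq_getElem?_getD, List.getElem?_set_self (by omega)]
          rfl
        rw [hset]
        simp
      · have hset : (arr.set a true).getD k false = arr.getD k false := by
          rw [List.getD_eq_getElem?_getD, List.getElem?_set_ne (by omega)]
          rfl
        rw [hset]
        simp [hk]
    · simp only [if_neg h]
      simp

-- characterisation of A's main loop as two separate scans of the remaining indices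
theorem zadLoop_eq (t : List Int) (fib : List Bool) :
    ∀ (l : List Nat) (flag : Bool),
    zadLoop t fib l flag =
      (if l.any (fun j => fib.getD j false && !is_composite (t.getD j 0)) then false
       else flag || l.any (fun j => is_prime (t.getD j 0))) := by
  intro l
  induction l with
  | nil => intro flag; simp [zadLoop]
  | cons i rest ih =>
    intro flag
    simp only [zadLoop, List.any_cons]
    by_cases hcond : (fib.getD i false && !is_composite (t.getD i 0)) = true
    · rw [hcond]
      simp
    · have hcond' : (fib.getD i false && !is_composite (t.getD i 0)) = false := by
        simpa using hcond
      rw [if_neg hcond, hcond', Bool.false_or]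
      by_cases hprime : is_prime (t.getD i 0) = true
      · rw [if_pos hprime, hprime, ih true]
        cases hany : rest.any (fun j => fib.getD j false && !is_composite (t.getD j 0)) <;> simp
      · have hprime' : is_prime (t.getD i 0) = false := by simpa using hprime
        rw [if_neg hprime, hprime', ih flag, Bool.false_or]

-- the fib-indexed scan over range n equals the scan over the fib index list
theorem range_any_fib (t : List Int) :
    ((List.range t.length).any
        (fun j => (fibMark t.length (List.replicate t.length false) 1 1 (t.length + 2)).getD j false
                  && !is_composite (t.getD j 0)))
      = (fibList t.length 1 1 (t.length + 2)).any (fun i => !is_composite (t.getD i 0)) := by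
  rw [Bool.eq_iff_iff, List.any_eq_true, List.any_eq_true]
  constructor
  · rintro ⟨j, hj, hP⟩
    rw [Bool.and_eq_true, fibMark_getD t.length (t.length + 2) _ 1 1 j (by simp)] at hP
    refine ⟨j, ?_, hP.2⟩
    have := hP.1
    simpa using this
  · rintro ⟨j, hj, hP⟩
    refine ⟨j, by simpa using fibList_lt t.length (t.length + 2) 1 1 j hj, ?_⟩
    rw [Bool.and_eq_true, fibMark_getD t.length (t.length + 2) _ 1 1 j (by simp)]
    exact ⟨by simp [hj], hP⟩

-- scanning primes by index equals scanning the list directly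
theorem range_any_prime (t : List Int) :
    ((List.range t.length).any (fun j => is_prime (t.getD j 0))) = t.any (fun x => is_prime x) := by
  rw [Bool.eq_iff_iff, List.any_eq_true, List.any_eq_true]
  constructor
  · rintro ⟨j, hj, hP⟩
    simp only [List.mem_range] at hj
    exact ⟨t.getD j 0, by rw [List.getD_eq_getElem _ _ hj]; exact t.getElem_mem hj, hP⟩
  · rintro ⟨x, hx, hP⟩
    obtain ⟨j, hj, rfl⟩ := List.getElem_of_mem hx
    exact ⟨j, by simpa using hj, by rwa [List.getD_eq_getElem _ _ hj]⟩

-- ===== VERDICT (by name: the statement is the Claim_ definition above) =====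
theorem zad15_spec : Claim_equal_zad15 := by
  intro t _
  unfold Spec_zad15 zad15 zad15_alt
  rw [zadLoop_eq, range_any_fib, range_any_prime, Bool.false_or]
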